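-- pv_equiv track=rewrite | github.com/ESA-PhiLab/OpenSarToolkit | ost/helpers/copernicus.py | extract_basic_metadata
-- ===== SOURCE A (Python) =====
-- def extract_basic_metadata(properties):
--
--     # those are the things we wnat out of the standard json
--     wanted = ['title', 'orbitDirection', 'platform', 'polarisation', 'swath', 'thumbnail', 'published']
--
--     # loop through all properties
--     _dict = {}
--     for k, v in properties.items():
--         # consider if in the list of wanted properties
--         if k in wanted:
--             if k == 'polarisation':
--                 # remove & sign
--                 _dict[k] = v.replace('&', ' ')
--             elif k == 'title':
--                 #  remove .SAFE extension
--                 _dict[k] = v[:-5]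
--             elif k == 'thumbnail':
--                 _dict[k] = '/'.join(v.split('/')[:-2]) + '/manifest.safe'
--             else:
--                 _dict[k] = v
--
--     sorted_dict = dict(sorted(_dict.items(), key=lambda item: wanted.index(item[0])))
--     return sorted_dict.values()
-- ===== SOURCE B (Python) =====
-- def extract_basic_metadata(properties):
--     # Single ordered pass over the fixed `wanted` list: no intermediate dict, no sort.
--     wanted = ['title', 'orbitDirection', 'platform', 'polarisation', 'swath', 'thumbnail', 'published']
--     out = []
--     for k in wanted:
--         if k in properties:
--             v = properties[k]
--             if k == 'polarisation':
--                 out.append(v.replace('&', ' '))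
--             elif k == 'title':
--                 out.append(v[:-5])
--             elif k == 'thumbnail':
--                 out.append('/'.join(v.split('/')[:-2]) + '/manifest.safe')
--             else:
--                 out.append(v)
--     return out
-- ===== Notes on version B (the rewrite author's own statement) =====
-- stated objective: simpler
-- what changed: Instead of collecting matching keys into a dict and then sorting its items by wanted.index, B makes one ordered pass over the fixed wanted list, looks each key up in properties and appends the transformed value, so the collect pass, the sort and the dict rebuild disappear.
import Mathlib
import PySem

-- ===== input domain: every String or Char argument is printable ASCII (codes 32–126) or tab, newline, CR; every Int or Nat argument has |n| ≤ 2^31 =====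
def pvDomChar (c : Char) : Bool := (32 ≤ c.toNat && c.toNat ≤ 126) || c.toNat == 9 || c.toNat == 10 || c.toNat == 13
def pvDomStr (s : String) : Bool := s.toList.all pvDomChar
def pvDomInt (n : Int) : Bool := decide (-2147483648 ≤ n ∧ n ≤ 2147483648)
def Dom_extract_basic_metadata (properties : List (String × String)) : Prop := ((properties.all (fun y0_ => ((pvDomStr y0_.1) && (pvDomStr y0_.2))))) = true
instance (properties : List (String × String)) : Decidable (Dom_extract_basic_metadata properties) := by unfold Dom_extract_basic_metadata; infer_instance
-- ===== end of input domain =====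

-- B replaces A's collect-into-a-dict-then-sort-by-wanted.index with a single ordered pass
-- over the fixed `wanted` list (objective: simpler; same per-field transforms).

-- the fixed list of wanted keys (identical literal in both Pythons)
def pvWanted : List String :=
  ["title", "orbitDirection", "platform", "polarisation", "swath", "thumbnail", "published"]

-- B's per-key value transform (the same if/elif chain Python B runs inside its loop)
def pvTransform (k v : String) : String :=
  if k == "polarisation" then PySem.Str.replace v "&" " "
  else if k == "title" then PySem.Str.slice v none (some (-5))          -- v[:-5]
  else if k == "thumbnail" then
    PySem.Str.join "/" (PySem.List.slice ((PySem.Str.split? v "/").getD []) none (some (-2)))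
      ++ "/manifest.safe"                                               -- '/'.join(v.split('/')[:-2]) + '/manifest.safe'
  else v

-- ===== PORT A =====
-- A: filter properties.items() into _dict applying the transforms, then sort the items by
-- wanted.index and return the values of the rebuilt dict. wanted.index can never raise here
-- (every key stored in _dict is in wanted), so `.getD 0` is an unreachable default.
def extract_basic_metadata (properties : List (String × String)) : List String :=
  let d := properties.foldl
    (fun d kv =>
      if pvWanted.contains kv.1 then
        if kv.1 == "polarisation" then d.insert kv.1 (PySem.Str.replace kv.2 "&" " ")
        else if kv.1 == "title" then d.insert kv.1 (PySem.Str.slice kv.2 none (some (-5)))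
        else if kv.1 == "thumbnail" then
          d.insert kv.1 (PySem.Str.join "/" (PySem.List.slice ((PySem.Str.split? kv.2 "/").getD []) none (some (-2)))
            ++ "/manifest.safe")
        else d.insert kv.1 kv.2
      else d)
    PySem.Dict.empty
  (PySem.Dict.ofList
      (PySem.List.sorted d.items (fun item => (PySem.List.index? pvWanted item.1).getD 0) false)).values

-- ===== PORT B =====
-- B: one pass over the fixed wanted list, skipping keys absent from the dict.
def extract_basic_metadata_alt (properties : List (String × String)) : List String :=
  let d := PySem.Dict.ofList properties
  pvWanted.filterMap (fun k => (d.get? k).map (fun v => pvTransform k v))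

-- ===== PRECONDITION & SPEC =====
def Spec_extract_basic_metadata (properties : List (String × String)) (out : List String) : Prop := out = extract_basic_metadata_alt properties
instance (properties : List (String × String)) (out : List String) : Decidable (Spec_extract_basic_metadata properties out) := by unfold Spec_extract_basic_metadata; infer_instance

-- ===== CLAIM (what is proved, stated in full; the proofs are below) =====
def Claim_equal_extract_basic_metadata : Prop := ∀ (properties : List (String × String)), Dom_extract_basic_metadata properties → Spec_extract_basic_metadata properties (extract_basic_metadata properties)

-- ===== LEMMAS AND PROOFS =====

-- A's branchy insert step is insertion of the transformed value
lemma pv_stepA_eq :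
    (fun (d : PySem.Dict String String) (kv : String × String) =>
      if pvWanted.contains kv.1 then
        if kv.1 == "polarisation" then d.insert kv.1 (PySem.Str.replace kv.2 "&" " ")
        else if kv.1 == "title" then d.insert kv.1 (PySem.Str.slice kv.2 none (some (-5)))
        else if kv.1 == "thumbnail" then
          d.insert kv.1 (PySem.Str.join "/" (PySem.List.slice ((PySem.Str.split? kv.2 "/").getD []) none (some (-2)))
            ++ "/manifest.safe")
        else d.insert kv.1 kv.2
      else d)
    = (fun d kv => if pvWanted.contains kv.1 then d.insert kv.1 (pvTransform kv.1 kv.2) else d) := by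
  funext d kv
  simp only [pvTransform]
  split_ifs <;> rfl

-- A's accumulation dict agrees, on wanted keys, with `pvTransform` of the input dict's value.
lemma pv_fold_get (props : List (String × String)) (d e : PySem.Dict String String)
    (h : ∀ k, pvWanted.contains k = true → d.get? k = (e.get? k).map (fun v => pvTransform k v)) :
    ∀ k, pvWanted.contains k = true →
      (props.foldl (fun d kv => if pvWanted.contains kv.1 then d.insert kv.1 (pvTransform kv.1 kv.2) else d) d).get? k
        = ((props.foldl (fun d kv => d.insert kv.1 kv.2) e).get? k).map (fun v => pvTransform k v) := by
  induction props generalizing d e with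
  | nil => exact h
  | cons kv rest ih =>
    obtain ⟨a, b⟩ := kv
    intro k hk
    simp only [List.foldl_cons]
    refine ih _ _ ?_ k hk
    intro j hj
    by_cases hc : pvWanted.contains a = true
    · rw [if_pos hc]
      simp only [PySem.Dict.get?_insert]
      by_cases hja : j = a
      · simp [hja]
      · simp [hja, h j hj]
    · rw [if_neg hc]
      have hja : j ≠ a := fun e => hc (e ▸ hj)
      simp only [PySem.Dict.get?_insert, if_neg hja]
      exact h j hj

lemma pv_fold_nodup (props : List (String × String)) (d : PySem.Dict String String)
    (h : d.keys.Nodup) :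
    (props.foldl (fun d kv => if pvWanted.contains kv.1 then d.insert kv.1 (pvTransform kv.1 kv.2) else d) d).keys.Nodup := by
  induction props generalizing d with
  | nil => exact h
  | cons kv rest ih =>
    simp only [List.foldl_cons]
    refine ih _ ?_
    by_cases hc : pvWanted.contains kv.1 = true
    · rw [if_pos hc]
      exact PySem.Dict.nodup_keys_insert _ _ _ h
    · rw [if_neg hc]
      exact h

lemma pv_fold_keys (props : List (String × String)) (d : PySem.Dict String String) :
    ∀ k ∈ (props.foldl (fun d kv => if pvWanted.contains kv.1 then d.insert kv.1 (pvTransform kv.1 kv.2) else d) d).keys,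
      k ∈ pvWanted ∨ k ∈ d.keys := by
  induction props generalizing d with
  | nil => exact fun k hk => Or.inr hk
  | cons kv rest ih =>
    intro k hk
    simp only [List.foldl_cons] at hk
    rcases ih _ k hk with h | h
    · exact Or.inl h
    · by_cases hc : pvWanted.contains kv.1 = true
      · rw [if_pos hc] at h
        rcases (PySem.Dict.mem_keys_insert _ _ _ _).mp h with rfl | h
        · exact Or.inl (by simpa using hc)
        · exact Or.inr h
      · rw [if_neg hc] at h
        exact Or.inr h

-- keys produced by the filterMap form a sublist of the scanned list
lemma pv_fm_fst_sublist (l : List String) (g : String → Option String) :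
    ((l.filterMap (fun k => (g k).map (fun v => (k, v)))).map Prod.fst).Sublist l := by
  induction l with
  | nil => simp
  | cons a t ih =>
    cases hg : g a with
    | none => simpa [List.filterMap_cons, hg] using ih.cons a
    | some v => simpa [List.filterMap_cons, hg] using ih.cons₂ a

-- the sort-then-rebuild of any dict whose keys all lie in pvWanted is the ordered filterMap over pvWanted
lemma pv_sort_values (d : PySem.Dict String String) (hnd : d.keys.Nodup)
    (hw : ∀ p ∈ d.items, p.1 ∈ pvWanted) :
    (PySem.Dict.ofList
        (PySem.List.sorted d.items (fun item => (PySem.List.index? pvWanted item.1).getD 0) false)).values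
      = pvWanted.filterMap (fun k => d.get? k) := by
  set ys : List (String × String) :=
    pvWanted.filterMap (fun k => (d.get? k).map (fun v => (k, v))) with hys
  have hsub : (ys.map Prod.fst).Sublist pvWanted := pv_fm_fst_sublist _ _
  have hndW : pvWanted.Nodup := by decide
  have hys_nodup : ys.Nodup := by
    refine (List.Nodup.of_map Prod.fst ?_)
    exact hndW.sublist hsub
  have hitems_nodup : d.items.Nodup := List.Nodup.of_map Prod.fst hnd
  have hmem : ∀ p : String × String, p ∈ ys ↔ p ∈ d.items := by
    intro ⟨k, v⟩
    constructor
    · intro hp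
      simp only [hys, List.mem_filterMap] at hp
      obtain ⟨a, _, ha⟩ := hp
      cases hga : d.get? a with
      | none => simp [hga] at ha
      | some w =>
        simp [hga] at ha
        obtain ⟨rfl, rfl⟩ := ha
        exact PySem.Dict.mem_items_of_get?_eq_some _ hga
    · intro hp
      have hget : d.get? k = some v := PySem.Dict.get?_of_mem_items _ hp hnd
      have hkw : k ∈ pvWanted := hw _ hp
      simp only [hys, List.mem_filterMap]
      exact ⟨k, hkw, by simp [hget]⟩
  have hperm : ys.Perm d.items :=
    (List.perm_ext_iff_of_nodup hys_nodup hitems_nodup).mpr hmem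
  have hpw : ys.Pairwise (fun a b : String × String =>
      (PySem.List.index? pvWanted a.1).getD 0 < (PySem.List.index? pvWanted b.1).getD 0) := by
    have hW : pvWanted.Pairwise (fun a b =>
        (PySem.List.index? pvWanted a).getD 0 < (PySem.List.index? pvWanted b).getD 0) := by decide
    exact List.Pairwise.of_map Prod.fst (fun a b h => h) (hW.sublist hsub)
  have hsorted :
      PySem.List.sorted d.items (fun item => (PySem.List.index? pvWanted item.1).getD 0) false = ys :=
    PySem.List.sorted_eq_of_perm_of_pairwise_lt _ _ _ hperm hpw
  rw [hsorted]
  have hofl : (PySem.Dict.ofList ys).items = ys := by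
    have hfresh : ∀ p ∈ ys, (PySem.Dict.empty : PySem.Dict String String).contains p.1 = false := by
      intro p _; simp [PySem.Dict.contains_empty]
    have := PySem.Dict.items_foldl_insert_fresh ys (fun p : String × String => p.1)
      (fun p : String × String => p.2) PySem.Dict.empty hfresh (hndW.sublist hsub)
    simpa [PySem.Dict.ofList] using this
  show (PySem.Dict.ofList ys).items.map Prod.snd = _
  rw [hofl, hys, List.map_filterMap]
  congr 1
  funext k
  cases d.get? k <;> simp

-- ===== VERDICT (by name: the statement is the Claim_ definition above) =====
theorem extract_basic_metadata_spec : Claim_equal_extract_basic_metadata := by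
  intro props _
  unfold Spec_extract_basic_metadata extract_basic_metadata extract_basic_metadata_alt
  rw [pv_stepA_eq]
  set F := props.foldl
    (fun d kv => if pvWanted.contains kv.1 then d.insert kv.1 (pvTransform kv.1 kv.2) else d)
    PySem.Dict.empty with hF
  have hnd : F.keys.Nodup := pv_fold_nodup props _ (by simp [PySem.Dict.keys_empty])
  have hw : ∀ p ∈ F.items, p.1 ∈ pvWanted := by
    intro p hp
    have hk : p.1 ∈ F.keys := PySem.Dict.mem_keys_of_mem_items _ hp
    rcases pv_fold_keys props _ p.1 hk with h | h
    · exact h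
    · simp [PySem.Dict.keys_empty] at h
  rw [pv_sort_values F hnd hw]
  refine List.filterMap_congr (fun k hk => ?_)
  exact pv_fold_get props PySem.Dict.empty PySem.Dict.empty
    (fun j _ => by simp [PySem.Dict.get?_empty]) k (by simpa using hk)
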